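-- pv_equiv track=rewrite | github.com/ZiadHatab/line-length-multiline-trl-calibration | lengthmtrl.py | wichmann_ruler
-- ===== SOURCE A (Python) =====
-- def wichmann_ruler(r: int, s: int) -> list:
--     """
--     Generate a Wichmann ruler sequence. https://en.wikipedia.org/wiki/Sparse_ruler
--
--     Args:
--         r (int): Number of repeated segments in the Wichmann construction.
--         s (int): Additional segment parameter in the Wichmann construction.
--
--     Returns:
--         list: List of ruler marks (positions) for the Wichmann sparse ruler.
--     """
--     segments = []
--     segments.extend([1]*r)
--     segments.append(r + 1)
--     segments.extend([2*r + 1]*r)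
--     segments.extend([4*r + 3]*s)
--     segments.extend([2*r + 2]*(r + 1))
--     segments.extend([1]*r)
--     marks = [0]
--     current = 0
--     for seg in segments:
--         current += seg
--         marks.append(current)
--     return marks
-- ===== SOURCE B (Python) =====
-- def wichmann_ruler(r: int, s: int) -> list:
--     """Wichmann sparse ruler marks, emitted per (step, count) block from a running base."""
--     marks = [0]
--     base = 0
--     for step, count in ((1, r), (r + 1, 1), (2*r + 1, r), (4*r + 3, s), (2*r + 2, r + 1), (1, r)):
--         n = max(count, 0)
--         marks.extend(base + i * step for i in range(1, n + 1))
--         base += n * step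
--     return marks
-- ===== Notes on version B (the rewrite author's own statement) =====
-- stated objective: alternative
-- what changed: B never builds the flat segments list nor accumulates mark-by-mark: it iterates six (step,count) blocks, emitting each block's marks as an arithmetic progression base + i*step off a per-block base.
import Mathlib
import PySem

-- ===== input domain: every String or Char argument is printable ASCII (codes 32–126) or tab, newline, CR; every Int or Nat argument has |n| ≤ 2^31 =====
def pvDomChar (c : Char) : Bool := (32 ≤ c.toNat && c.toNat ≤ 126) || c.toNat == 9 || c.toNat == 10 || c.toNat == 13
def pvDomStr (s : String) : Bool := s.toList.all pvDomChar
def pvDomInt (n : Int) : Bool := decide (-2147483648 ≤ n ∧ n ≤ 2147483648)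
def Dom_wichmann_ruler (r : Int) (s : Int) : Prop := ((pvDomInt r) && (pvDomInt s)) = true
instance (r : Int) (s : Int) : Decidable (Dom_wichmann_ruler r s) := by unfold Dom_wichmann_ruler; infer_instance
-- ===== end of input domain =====

-- B emits each (step,count) block's marks as an arithmetic progression off a per-block base
-- instead of building A's flat segments list and accumulating mark-by-mark; alternative decomposition, same cost.

-- ===== PORT A =====
-- A's loop body: current += seg; marks.append(current)
def pvStepA (st : List Int × Int) (seg : Int) : List Int × Int :=
  (st.1 ++ [st.2 + seg], st.2 + seg)

def wichmann_ruler (r : Int) (s : Int) : List Int :=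
  let segments : List Int :=
    List.replicate r.toNat 1 ++ [r + 1] ++ List.replicate r.toNat (2*r + 1)
      ++ List.replicate s.toNat (4*r + 3) ++ List.replicate (r + 1).toNat (2*r + 2)
      ++ List.replicate r.toNat 1
  (segments.foldl pvStepA ([0], 0)).1

-- ===== PORT B =====
-- B's loop body: n = max(count,0); marks.extend(base + i*step for i in range(1, n+1)); base += n*step
def pvStepB (st : List Int × Int) (b : Int × Int) : List Int × Int :=
  let n := max b.2 0
  (st.1 ++ (PySem.List.pyRange 1 (n + 1) 1).map (fun i => st.2 + i * b.1), st.2 + n * b.1)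

def wichmann_ruler_alt (r : Int) (s : Int) : List Int :=
  let blocks : List (Int × Int) :=
    [(1, r), (r + 1, 1), (2*r + 1, r), (4*r + 3, s), (2*r + 2, r + 1), (1, r)]
  (blocks.foldl pvStepB ([0], 0)).1

-- ===== PRECONDITION & SPEC =====
def Spec_wichmann_ruler (r : Int) (s : Int) (out : List Int) : Prop := out = wichmann_ruler_alt r s
instance (r : Int) (s : Int) (out : List Int) : Decidable (Spec_wichmann_ruler r s out) := by unfold Spec_wichmann_ruler; infer_instance

-- ===== CLAIM (what is proved, stated in full; the proofs are below) =====
def Claim_equal_wichmann_ruler : Prop := ∀ (r : Int) (s : Int), Dom_wichmann_ruler r s → Spec_wichmann_ruler r s (wichmann_ruler r s)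

-- ===== LEMMAS AND PROOFS =====

-- A's fold over one replicated segment block, in closed form.
theorem pv_foldA (step : Int) : ∀ (n : Nat) (st : List Int × Int),
    (List.replicate n step).foldl pvStepA st
      = (st.1 ++ (List.range n).map (fun i : Nat => st.2 + ((i : Int) + 1) * step),
         st.2 + (n : Int) * step) := by
  intro n
  induction n with
  | zero => intro st; simp
  | succ n ih =>
    intro st
    rw [List.replicate_succ', List.foldl_append, ih, List.foldl_cons, List.foldl_nil]
    show ((st.1 ++ _) ++ [st.2 + (n : Int) * step + step], st.2 + (n : Int) * step + step) = _
    have he : (List.map (fun i : Nat => st.2 + ((i : Int) + 1) * step) [n])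
        = [st.2 + (n : Int) * step + step] := by
      simp only [List.map_cons, List.map_nil, List.cons.injEq, and_true]
      ring
    refine Prod.ext ?_ ?_
    · rw [List.range_succ, List.map_append, he, List.append_assoc]
    · push_cast; ring

-- B's step on a block (step, c), expressed with the same Nat-range emission as A's.
theorem pv_stepB_eq (stp c : Int) (st : List Int × Int) :
    pvStepB st (stp, c)
      = (st.1 ++ (List.range c.toNat).map (fun i : Nat => st.2 + ((i : Int) + 1) * stp),
         st.2 + (c.toNat : Int) * stp) := by
  have h : (max c 0 : Int) = (c.toNat : Int) := (Int.ofNat_toNat c).symm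
  simp only [pvStepB, h]
  have hr : PySem.List.pyRange 1 ((c.toNat : Int) + 1) 1
      = (List.range c.toNat).map (fun k : Nat => (1 : Int) + k) := by
    rw [PySem.List.pyRange_one]
    norm_num
    congr 2
    omega
  rw [hr]
  refine Prod.ext ?_ rfl
  simp only [List.map_map]
  congr 1
  apply List.map_congr_left
  intro i _
  simp only [Function.comp_apply]
  ring

-- A's singleton segment [r+1] and B's block (r+1, 1) both append one mark.
theorem pv_stepA_eq (seg : Int) (st : List Int × Int) :
    pvStepA st seg = (st.1 ++ [st.2 + seg], st.2 + seg) := rfl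

theorem pv_stepB_one (stp : Int) (st : List Int × Int) :
    pvStepB st (stp, 1) = (st.1 ++ [st.2 + stp], st.2 + stp) := by
  rw [pv_stepB_eq]
  norm_num [List.range_succ]

-- ===== VERDICT (by name: the statement is the Claim_ definition above) =====
theorem wichmann_ruler_spec : Claim_equal_wichmann_ruler := by
  intro r s _
  show wichmann_ruler r s = wichmann_ruler_alt r s
  unfold wichmann_ruler wichmann_ruler_alt
  simp only [List.foldl_cons, List.foldl_nil, List.foldl_append]
  rw [pv_stepB_one, pv_stepB_eq, pv_stepB_eq, pv_stepB_eq, pv_stepB_eq, pv_stepB_eq]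
  rw [pv_foldA, pv_stepA_eq, pv_foldA, pv_foldA, pv_foldA, pv_foldA]
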